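-- pv_equiv track=rewrite | github.com/andreycizov/python-vow | vow/oas/obj/op.py | _split_path_parameters
-- ===== SOURCE A (Python) =====
-- def _split_path_parameters(x: str):
--     start = 0
--
--     while True:
--         idx_a = x.find('{', start)
--
--         if idx_a == -1:
--             break
--
--         idx_b = x.find('}', idx_a)
--
--         if idx_b == -1:
--             break
--
--         yield idx_a + 1, idx_b
--
--         start = idx_b
-- ===== SOURCE B (Python) =====
-- def _brace_positions(x, ch):
--     return [i for i, c in enumerate(x) if c == ch]
--
--
-- def _split_path_parameters(x: str):
--     # staged: first index the braces, then pair the two sorted index lists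
--     # with a two-pointer merge instead of rescanning the string.
--     opens = _brace_positions(x, '{')
--     closes = _brace_positions(x, '}')
--     i = j = 0
--     while i < len(opens) and j < len(closes):
--         o = opens[i]
--         while j < len(closes) and closes[j] < o:
--             j += 1
--         if j == len(closes):
--             return
--         c = closes[j]
--         yield o + 1, c
--         while i < len(opens) and opens[i] < c:
--             i += 1
-- ===== Notes on version B (the rewrite author's own statement) =====
-- stated objective: alternative
-- what changed: Instead of A's single scan that repeatedly calls find while advancing a cursor, B first builds the two sorted index lists of opening and of closing braces (staged passes) and then pairs them with a two-pointer merge over those lists, never rescanning the string.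
import Mathlib
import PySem

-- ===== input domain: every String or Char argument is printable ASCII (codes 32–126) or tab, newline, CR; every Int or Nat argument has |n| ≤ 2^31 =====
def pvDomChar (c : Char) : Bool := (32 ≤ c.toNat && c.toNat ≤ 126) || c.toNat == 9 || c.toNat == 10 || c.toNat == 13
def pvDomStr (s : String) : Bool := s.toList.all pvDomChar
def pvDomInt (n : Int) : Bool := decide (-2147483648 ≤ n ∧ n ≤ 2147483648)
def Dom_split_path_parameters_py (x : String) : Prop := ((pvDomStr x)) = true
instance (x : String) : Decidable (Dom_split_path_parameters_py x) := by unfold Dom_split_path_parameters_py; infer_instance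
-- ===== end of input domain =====

-- B replaces A's cursor-advancing find('{')/find('}') scan by staged passes: it first
-- builds the sorted index lists of '{' and '}', then pairs them with a two-pointer merge.


-- ===== PORT A =====
-- A's `while True` loop; fuel (length+1) only makes the recursion total: each iteration
-- sets start := idx_b > previous start, so the loop runs at most length+1 times.
def aLoop_split (x : String) (fuel : Nat) (start : Int) : List (Int × Int) :=
  match fuel with
  | 0 => []
  | fuel + 1 =>
    let idx_a := PySem.Str.findFrom x "{" start
    if idx_a = -1 then []
    else
      let idx_b := PySem.Str.findFrom x "}" idx_a
      if idx_b = -1 then []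
      else (idx_a + 1, idx_b) :: aLoop_split x fuel idx_b

def split_path_parameters_py (x : String) : List (Int × Int) :=
  aLoop_split x (x.toList.length + 1) 0

-- ===== PORT B =====
-- port of _brace_positions: `[i for i, c in enumerate(x) if c == ch]`
-- (the enumerate comprehension, as structural recursion carrying the index i)
def bPositions (l : List Char) (ch : Char) (i : Nat) : List Nat :=
  match l with
  | [] => []
  | c :: rest => if c = ch then i :: bPositions rest ch (i + 1) else bPositions rest ch (i + 1)

-- port of B's two-pointer merge loop over the two index lists: the pointers i and j
-- become the suffixes `opens` and `closes`; the inner `while closes[j] < o: j += 1`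
-- and `while opens[i] < c: i += 1` advances are the two dropWhile's.
def bMerge (opens closes : List Nat) : List (Int × Int) :=
  match opens with
  | [] => []
  | o :: os =>
    match closes.dropWhile (fun c => decide (c < o)) with
    | [] => []
    | c :: cs => ((o : Int) + 1, (c : Int)) :: bMerge (os.dropWhile (fun p => decide (p < c))) (c :: cs)
termination_by opens.length
decreasing_by
  have := List.length_dropWhile_le (fun p => decide (p < c)) os
  simp; omega

def split_path_parameters_py_alt (x : String) : List (Int × Int) :=
  bMerge (bPositions x.toList '{' 0) (bPositions x.toList '}' 0)

-- ===== PRECONDITION & SPEC =====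
def Spec_split_path_parameters_py (x : String) (out : List (Int × Int)) : Prop := out = split_path_parameters_py_alt x
instance (x : String) (out : List (Int × Int)) : Decidable (Spec_split_path_parameters_py x out) := by unfold Spec_split_path_parameters_py; infer_instance

-- ===== CLAIM (what is proved, stated in full; the proofs are below) =====
def Claim_equal_split_path_parameters_py : Prop := ∀ (x : String), Dom_split_path_parameters_py x → Spec_split_path_parameters_py x (split_path_parameters_py x)

-- ===== LEMMAS AND PROOFS =====

-- proof-only intermediate scan: both ports are proved equal to this left-to-right scan
-- (bScan l i = the pairs produced from position i, l being the suffix of the string at i)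
def bScan : List Char → Nat → List (Int × Int)
  | [], _ => []
  | c :: rest, i =>
    if c = '{' then
      match List.findIdx? (· = '}') rest with
      | some k => (((i : Int) + 1), ((i : Int) + 1 + k)) :: bScan (rest.drop (k + 1)) (i + k + 2)
      | none => bScan rest (i + 1)
    else bScan rest (i + 1)
termination_by l _ => l.length
decreasing_by
  all_goals simp [List.length_drop]

-- [d] is a prefix of l.drop i  ↔  l[i]? = some d
theorem pv_prefix_singleton_drop {d : Char} {l : List Char} {i : Nat} :
    ([d] <+: l.drop i) ↔ l[i]? = some d := by
  rw [← List.head?_drop]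
  cases l.drop i with
  | nil => simp
  | cons a t =>
    constructor
    · rintro ⟨u, hu⟩; cases hu; simp
    · intro h; simp at h; exact ⟨t, by simp [h]⟩

-- Chars.find of a single-character needle is findIdx?
theorem pv_find_singleton (t : List Char) (d : Char) :
    PySem.Chars.find t [d] =
      (match List.findIdx? (· = d) t with
       | none => (-1 : Int)
       | some m => (m : Int)) := by
  cases h : List.findIdx? (· = d) t with
  | none =>
    have hm : ∀ x ∈ t, ¬ x = d := by
      intro x hx
      have := (List.findIdx?_eq_none_iff.mp h) x hx
      simpa using this
    apply (PySem.Chars.find_eq_neg_one_iff t [d]).mpr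
    intro hinf
    have : d ∈ t := hinf.sublist.mem (by simp)
    exact hm d this rfl
  | some m =>
    obtain ⟨hlt, hp, hmin⟩ := List.findIdx?_eq_some_iff_getElem.mp h
    have hd : t[m] = d := by simpa using hp
    have hmem : d ∈ t := hd ▸ List.getElem_mem hlt
    have hinf : [d] <:+: t := by
      obtain ⟨l, r, rfl⟩ := List.append_of_mem hmem
      exact ⟨l, r, by simp⟩
    have hnn : 0 ≤ PySem.Chars.find t [d] := (PySem.Chars.find_nonneg_iff t [d]).mpr hinf
    obtain ⟨hpre, hmin'⟩ := PySem.Chars.find_spec hnn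
    set f := (PySem.Chars.find t [d]).toNat with hf
    have hfd : t[f]? = some d := pv_prefix_singleton_drop.mp hpre
    have hflt : f < t.length := by
      by_contra hge
      simp [List.getElem?_eq_none (show t.length ≤ f by omega)] at hfd
    have h1 : ¬ m < f := by
      intro hlt'
      exact hmin' m hlt' (pv_prefix_singleton_drop.mpr (by simp [List.getElem?_eq_getElem hlt, hd]))
    have h2 : ¬ f < m := by
      intro hlt'
      have : t[f] = d := by
        have := List.getElem?_eq_getElem hflt
        rw [this] at hfd; exact Option.some.inj hfd
      exact hmin f hlt' (by simpa using this)
    have : f = m := by omega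
    simp only []
    omega

-- no '{' in t  →  bScan t i = []
theorem pv_bScan_no_open : ∀ (t : List Char) (i : Nat), '{' ∉ t → bScan t i = [] := by
  intro t
  induction t with
  | nil => intro i _; simp [bScan]
  | cons c rest ih =>
    intro i h
    have hc : ¬ c = '{' := by intro hc; exact h (by simp [hc])
    have hr : '{' ∉ rest := fun hm => h (by simp [hm])
    simp [bScan, hc, ih _ hr]

-- no '}' in t  →  bScan t i = []
theorem pv_bScan_no_close : ∀ (t : List Char) (i : Nat), '}' ∉ t → bScan t i = [] := by
  intro t
  induction t with
  | nil => intro i _; simp [bScan]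
  | cons c rest ih =>
    intro i h
    have hr : '}' ∉ rest := fun hm => h (by simp [hm])
    have hfind : List.findIdx? (· = '}') rest = none :=
      List.findIdx?_eq_none_iff.mpr (fun x hx => by
        simp only [decide_eq_false_iff_not]
        intro he; exact hr (he ▸ hx))
    by_cases hc : c = '{'
    · simp [bScan, hc, hfind, ih _ hr]
    · simp [bScan, hc, ih _ hr]

-- skipping a '{'-free block
theorem pv_bScan_skip : ∀ (t₁ u : List Char) (i : Nat), '{' ∉ t₁ →
    bScan (t₁ ++ u) i = bScan u (i + t₁.length) := by
  intro t₁
  induction t₁ with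
  | nil => intro u i _; simp
  | cons c rest ih =>
    intro u i h
    have hc : ¬ c = '{' := by intro hc; exact h (by simp [hc])
    have hr : '{' ∉ rest := fun hm => h (by simp [hm])
    have e : i + 1 + rest.length = i + (rest.length + 1) := by omega
    simp [bScan, hc, ih u (i+1) hr, e]

-- ===== A-side: aLoop_split = bScan =====
theorem pv_main : ∀ (fuel : Nat) (x : String) (k : Nat), k ≤ x.toList.length →
    x.toList.length - k < fuel →
    aLoop_split x fuel (k : Int) = bScan (x.toList.drop k) k := by
  intro fuel
  induction fuel with
  | zero => intro x k hk hf; omega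
  | succ fuel ih =>
    intro x k hk hf
    have hbl : "{".toList = ['{'] := rfl
    have hcl : "}".toList = ['}'] := rfl
    simp only [aLoop_split, PySem.Str.findFrom_eq, hbl, hcl]
    cases hA : List.findIdx? (· = '{') (x.toList.drop k) with
    | none =>
      have hno : '{' ∉ x.toList.drop k := by
        intro hmem
        have := (List.findIdx?_eq_none_iff.mp hA) _ hmem
        simp at this
      have hfind1 : PySem.Chars.find (x.toList.drop k) ['{'] = -1 := by
        rw [pv_find_singleton, hA]
      rw [PySem.Chars.findFrom_natCast x.toList ['{'] k hk, hfind1]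
      simp [pv_bScan_no_open _ _ hno]
    | some j =>
      obtain ⟨hjlt, hpj, hminj⟩ := List.findIdx?_eq_some_iff_getElem.mp hA
      have hpj' : (x.toList.drop k)[j] = '{' := by simpa using hpj
      have hkj : k + j < x.toList.length := by
        have : (x.toList.drop k).length = x.toList.length - k := List.length_drop
        omega
      have hgkj : x.toList[k + j]'hkj = '{' := by
        rw [← hpj', List.getElem_drop]
      have hsplit : x.toList.drop (k + j) = '{' :: x.toList.drop (k + j + 1) := by
        rw [List.drop_eq_getElem_cons hkj, hgkj]
      have hfind1 : PySem.Chars.find (x.toList.drop k) ['{'] = (j : Int) := by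
        rw [pv_find_singleton, hA]
      have hidx_a : PySem.Chars.findFrom x.toList ['{'] (k : Int) = ((k + j : Nat) : Int) := by
        rw [PySem.Chars.findFrom_natCast x.toList ['{'] k hk, hfind1]
        rw [if_neg (by omega)]
        push_cast; ring
      rw [hidx_a, if_neg (by omega : ¬ ((k + j : Nat) : Int) = -1)]
      rw [PySem.Chars.findFrom_natCast x.toList ['}'] (k + j) (by omega), hsplit]
      have htk : x.toList.drop k = (x.toList.drop k).take j ++ ('{' :: x.toList.drop (k + j + 1)) := by
        conv_lhs => rw [← List.take_append_drop j (x.toList.drop k)]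
        rw [List.drop_drop, hsplit]
      have hnotake : '{' ∉ (x.toList.drop k).take j := by
        intro hmem
        obtain ⟨i, hilt, hgi⟩ := List.mem_iff_getElem.mp hmem
        have hilt' : i < j := by
          have := List.length_take (i := j) (l := x.toList.drop k); omega
        have : (x.toList.drop k)[i]'(by omega) = '{' := by
          rw [← hgi, List.getElem_take]
        exact hminj i hilt' (by simp [this])
      have hlentake : ((x.toList.drop k).take j).length = j := by
        have := List.length_take (i := j) (l := x.toList.drop k)
        have := List.length_drop (i := k) (l := x.toList)
        omega
      cases hB : List.findIdx? (· = '}') (x.toList.drop (k + j + 1)) with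
      | none =>
        have hnoc : '}' ∉ x.toList.drop (k + j + 1) := by
          intro hmem
          have := (List.findIdx?_eq_none_iff.mp hB) _ hmem
          simp at this
        have hfind2 : PySem.Chars.find ('{' :: x.toList.drop (k + j + 1)) ['}'] = -1 := by
          rw [pv_find_singleton, List.findIdx?_cons]
          simp [hB]
        rw [hfind2, if_pos rfl]
        rw [htk, pv_bScan_skip _ _ _ hnotake, hlentake]
        rw [bScan, if_pos rfl, hB]
        exact (pv_bScan_no_close _ _ hnoc).symm
      | some m =>
        obtain ⟨hmlt, hpm, hminm⟩ := List.findIdx?_eq_some_iff_getElem.mp hB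
        have hpm' : (x.toList.drop (k + j + 1))[m] = '}' := by simpa using hpm
        have hkjm : k + j + 1 + m < x.toList.length := by
          have := List.length_drop (i := k + j + 1) (l := x.toList); omega
        have hfind2 : PySem.Chars.find ('{' :: x.toList.drop (k + j + 1)) ['}'] = ((m + 1 : Nat) : Int) := by
          rw [pv_find_singleton, List.findIdx?_cons]
          simp [hB]
        rw [hfind2, if_neg (by omega : ¬ ((m + 1 : Nat) : Int) = -1)]
        have hcast : ((k + j : Nat) : Int) + ((m + 1 : Nat) : Int) = ((k + j + m + 1 : Nat) : Int) := by
          push_cast; ring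
        rw [hcast, if_neg (by omega : ¬ ((k + j + m + 1 : Nat) : Int) = -1)]
        have hlen1 : (List.drop k x.toList).length = x.toList.length - k := List.length_drop
        have hrec := ih x (k + j + m + 1) (by omega) (by omega)
        rw [hrec]
        have hg2 : x.toList[k + j + 1 + m]'(by omega) = '}' := by
          rw [← hpm', List.getElem_drop]
        have hsplit2 : x.toList.drop (k + j + m + 1) = '}' :: x.toList.drop (k + j + m + 2) := by
          have e : k + j + m + 1 = k + j + 1 + m := by omega
          rw [e, List.drop_eq_getElem_cons (by omega : k + j + 1 + m < x.toList.length), hg2]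
          have e2 : k + j + 1 + m + 1 = k + j + m + 2 := by omega
          rw [e2]
        have hL : bScan (x.toList.drop (k + j + m + 1)) (k + j + m + 1)
            = bScan (x.toList.drop (k + j + m + 2)) (k + j + m + 2) := by
          rw [hsplit2, bScan, if_neg (by decide)]
        have hR : bScan (x.toList.drop k) k
            = (((k + j : Nat) : Int) + 1, ((k + j : Nat) : Int) + 1 + (m : Int)) ::
                bScan (x.toList.drop (k + j + m + 2)) (k + j + m + 2) := by
          rw [htk, pv_bScan_skip _ _ _ hnotake, hlentake]
          rw [bScan, if_pos rfl, hB]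
          simp only [List.drop_drop]
          have e1 : k + j + 1 + (m + 1) = k + j + m + 2 := by omega
          rw [e1]
        rw [hL, hR]
        have e3 : ((k + j + m + 1 : Nat) : Int) = ((k + j : Nat) : Int) + 1 + (m : Int) := by
          push_cast; ring
        rw [e3]

-- ===== B-side: bMerge of the position lists = bScan =====

-- every position in bPositions t ch i is ≥ i
theorem pv_pos_ge : ∀ (t : List Char) (ch : Char) (i : Nat), ∀ j ∈ bPositions t ch i, i ≤ j := by
  intro t
  induction t with
  | nil => intro ch i j hj; simp [bPositions] at hj
  | cons c rest ih =>
    intro ch i j hj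
    by_cases hc : c = ch
    · simp [bPositions, hc] at hj
      rcases hj with rfl | hj
      · omega
      · have := ih ch (i+1) j hj; omega
    · simp [bPositions, hc] at hj
      have := ih ch (i+1) j hj; omega

-- bPositions over an append
theorem pv_pos_append : ∀ (t₁ t₂ : List Char) (ch : Char) (i : Nat),
    bPositions (t₁ ++ t₂) ch i = bPositions t₁ ch i ++ bPositions t₂ ch (i + t₁.length) := by
  intro t₁
  induction t₁ with
  | nil => intro t₂ ch i; simp [bPositions]
  | cons c rest ih =>
    intro t₂ ch i
    have e : i + 1 + rest.length = i + (rest.length + 1) := by omega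
    by_cases hc : c = ch <;> simp [bPositions, hc, ih, e]

-- ch ∉ t → no positions
theorem pv_pos_nil : ∀ (t : List Char) (ch : Char) (i : Nat), ch ∉ t → bPositions t ch i = [] := by
  intro t
  induction t with
  | nil => intro ch i _; simp [bPositions]
  | cons c rest ih =>
    intro ch i h
    have hc : ¬ c = ch := fun hc => h (by simp [hc])
    have hr : ch ∉ rest := fun hm => h (by simp [hm])
    simp [bPositions, hc, ih _ _ hr]

-- dropWhile (< b) is the identity on a list of positions all ≥ b
theorem pv_dropWhile_ge {l : List Nat} {b : Nat} (h : ∀ j ∈ l, b ≤ j) :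
    l.dropWhile (fun p => decide (p < b)) = l := by
  cases l with
  | nil => rfl
  | cons a t =>
    rw [List.dropWhile_cons_of_neg]
    simp only [decide_eq_true_eq]
    have := h a (by simp); omega

-- dropWhile (< b) drops a block all < b
theorem pv_dropWhile_lt : ∀ (l₁ l₂ : List Nat) (b : Nat), (∀ j ∈ l₁, j < b) →
    (l₁ ++ l₂).dropWhile (fun p => decide (p < b)) = l₂.dropWhile (fun p => decide (p < b)) := by
  intro l₁
  induction l₁ with
  | nil => intro l₂ b _; simp
  | cons a t ih =>
    intro l₂ b h
    have ha : a < b := h a (by simp)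
    rw [List.cons_append, List.dropWhile_cons_of_pos (by simpa using ha)]
    exact ih l₂ b (fun j hj => h j (by simp [hj]))

-- a leading close below every open is skipped by the first inner advance
theorem pv_bMerge_drop_close (os : List Nat) (c0 : Nat) (cs : List Nat)
    (h : ∀ o ∈ os, c0 < o) : bMerge os (c0 :: cs) = bMerge os cs := by
  cases os with
  | nil => simp [bMerge]
  | cons o os' =>
    have hc : c0 < o := h o (by simp)
    rw [bMerge, bMerge, List.dropWhile_cons_of_pos (by simpa using hc)]

-- the merge of the two position lists computes the scan
theorem pv_merge : ∀ (t : List Char) (i : Nat),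
    bMerge (bPositions t '{' i) (bPositions t '}' i) = bScan t i := by
  intro t i
  induction t, i using bScan.induct with
  | case1 i => simp [bPositions, bMerge, bScan]
  | case2 rest i k hk ih =>
    -- head is '{', first '}' in rest at k
    obtain ⟨hklt, hpk, hmink⟩ := List.findIdx?_eq_some_iff_getElem.mp hk
    have hpk' : rest[k] = '}' := by simpa using hpk
    have hsplit : rest = rest.take k ++ '}' :: rest.drop (k + 1) := by
      conv_lhs => rw [← List.take_append_drop k rest]
      rw [List.drop_eq_getElem_cons hklt, hpk']
    have hlentake : (rest.take k).length = k := by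
      have := List.length_take (i := k) (l := rest); omega
    have hnoc : '}' ∉ rest.take k := by
      intro hmem
      obtain ⟨m, hmlt, hgm⟩ := List.mem_iff_getElem.mp hmem
      have hmlt' : m < k := by
        have := List.length_take (i := k) (l := rest); omega
      have : rest[m]'(by omega) = '}' := by rw [← hgm, List.getElem_take]
      exact hmink m hmlt' (by simp [this])
    -- positions of the cons
    have hopens : bPositions ('{' :: rest) '{' i = i :: bPositions rest '{' (i + 1) := by
      simp [bPositions]
    have hcloses : bPositions ('{' :: rest) '}' i = bPositions rest '}' (i + 1) := by
      simp [bPositions]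
    -- closes of rest decompose at the first '}'
    have hcl : bPositions rest '}' (i + 1)
        = (i + 1 + k) :: bPositions (rest.drop (k + 1)) '}' (i + k + 2) := by
      conv_lhs => rw [hsplit]
      rw [pv_pos_append, pv_pos_nil _ _ _ hnoc, hlentake]
      have e : i + 1 + k + 1 = i + k + 2 := by omega
      simp [bPositions, e]
    -- opens of rest decompose as block < i+1+k ++ tail ≥ i+k+2
    have hop : bPositions rest '{' (i + 1)
        = bPositions (rest.take k) '{' (i + 1) ++ bPositions (rest.drop (k + 1)) '{' (i + k + 2) := by
      conv_lhs => rw [hsplit]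
      rw [pv_pos_append, hlentake]
      have e : i + 1 + k + 1 = i + k + 2 := by omega
      simp [bPositions, e]
    have htake_lt : ∀ j ∈ bPositions (rest.take k) '{' (i + 1), j < i + 1 + k := by
      intro j hj
      -- positions in a list of length k starting at i+1 are < i+1+k
      have : j ∈ bPositions (rest.take k) '{' (i + 1) := hj
      -- bound via append: positions of the prefix are below i+1+(take k).length
      have hb : ∀ (u : List Char) (b : Nat) (j : Nat), j ∈ bPositions u '{' b → j < b + u.length := by
        intro u
        induction u with
        | nil => intro b j hj; simp [bPositions] at hj
        | cons a s ihu =>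
          intro b j hj
          by_cases ha : a = '{'
          · simp [bPositions, ha] at hj
            rcases hj with rfl | hj
            · simp only [List.length_cons]; omega
            · have := ihu (b+1) j hj; simp only [List.length_cons]; omega
          · simp [bPositions, ha] at hj
            have := ihu (b+1) j hj; simp only [List.length_cons]; omega
      have := hb (rest.take k) (i + 1) j hj
      omega
    rw [bScan, if_pos rfl, hk]
    rw [hopens, hcloses, hcl, bMerge]
    -- dropWhile (< i) on closes: head i+1+k ≥ i, keep all
    have hdw1 : ((i + 1 + k) :: bPositions (rest.drop (k + 1)) '}' (i + k + 2)).dropWhile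
        (fun c => decide (c < i)) = (i + 1 + k) :: bPositions (rest.drop (k + 1)) '}' (i + k + 2) := by
      apply pv_dropWhile_ge
      intro j hj
      simp at hj
      rcases hj with rfl | hj
      · omega
      · have := pv_pos_ge _ _ _ j hj; omega
    rw [hdw1]
    -- dropWhile (< i+1+k) on opens tail
    have hdw2 : (bPositions rest '{' (i + 1)).dropWhile (fun p => decide (p < i + 1 + k))
        = bPositions (rest.drop (k + 1)) '{' (i + k + 2) := by
      rw [hop, pv_dropWhile_lt _ _ _ htake_lt]
      apply pv_dropWhile_ge
      intro j hj
      have := pv_pos_ge _ _ _ j hj; omega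
    dsimp only
    rw [hdw2]
    rw [pv_bMerge_drop_close _ _ _ (by
      intro o ho; have := pv_pos_ge _ _ _ o ho; omega), ih]
    have e : ((i + 1 + k : Nat) : Int) = (i : Int) + 1 + (k : Int) := by push_cast; ring
    simp [e]
  | case3 rest i hk ih =>
    -- head is '{', no '}' in rest
    have hnoc : '}' ∉ rest := by
      intro hmem
      have := (List.findIdx?_eq_none_iff.mp hk) _ hmem
      simp at this
    have : bPositions ('{' :: rest) '}' i = [] := by
      have : '}' ∉ '{' :: rest := by
        intro h; rcases List.mem_cons.mp h with h | h
        · exact absurd h.symm (by decide)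
        · exact hnoc h
      exact pv_pos_nil _ _ _ this
    rw [bScan, if_pos rfl, hk, this]
    rw [pv_bScan_no_close _ _ hnoc]
    simp [bPositions, bMerge]
  | case4 c rest i hc ih =>
    -- head is not '{'
    have hopens : bPositions (c :: rest) '{' i = bPositions rest '{' (i + 1) := by
      simp [bPositions, hc]
    rw [bScan, if_neg hc, hopens, ← ih]
    by_cases hcc : c = '}'
    · -- closes gain a leading i; the very first dropWhile (< o) removes it since o ≥ i+1
      rw [show bPositions (c :: rest) '}' i = i :: bPositions rest '}' (i + 1) by
        simp [bPositions, hcc]]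
      cases hO : bPositions rest '{' (i + 1) with
      | nil => simp [bMerge]
      | cons o os =>
        have ho : i + 1 ≤ o := pv_pos_ge _ _ _ o (by rw [hO]; simp)
        rw [bMerge, bMerge]
        rw [List.dropWhile_cons_of_pos (by simp; omega)]
    · rw [show bPositions (c :: rest) '}' i = bPositions rest '}' (i + 1) by
        simp [bPositions, hcc]]

-- ===== VERDICT (by name: the statement is the Claim_ definition above) =====
theorem split_path_parameters_py_spec : Claim_equal_split_path_parameters_py := by
  intro x _
  unfold Spec_split_path_parameters_py split_path_parameters_py split_path_parameters_py_alt
  rw [pv_merge]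
  have := pv_main (x.toList.length + 1) x 0 (by omega) (by omega)
  simpa using this
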